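-- pv_equiv track=rewrite | github.com/hogiljung/Algorithms | 프로그래머스/unrated/140108. 문자열 나누기/문자열 나누기.py | solution
-- ===== SOURCE A (Python) =====
-- def solution(s):
--     answer = 0
--     x_count = 0
--     other_count = 0
--
--     for c in s:
--         if x_count == other_count:
--             x = c
--             answer += 1
--
--         if c != x:
--             other_count += 1
--         else:
--             x_count += 1
--
--     return answer
-- ===== SOURCE B (Python) =====
-- def solution(s):
--     # Staged approach: repeatedly find the current segment's length directly as the
--     # smallest even k with 2 * s[:k].count(s[0]) == k (prefix-count search via str.count),
--     # then cut the segment off; no char-by-char counter state machine.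
--     answer = 0
--     while s:
--         x = s[0]
--         k = None
--         for j in range(2, len(s) + 1, 2):
--             if 2 * s[:j].count(x) == j:
--                 k = j
--                 break
--         answer += 1
--         s = s[k:] if k is not None else ""
--     return answer
-- ===== Notes on version B (the rewrite author's own statement) =====
-- stated objective: alternative
-- what changed: B abandons A's single-pass counter state machine: it repeatedly finds each segment's length directly as the smallest even k with 2*s[:k].count(s[0]) == k (a staged prefix-count search using str.count) and cuts the segment off, trading O(n) for a simpler declarative per-segment search.
import Mathlib
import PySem

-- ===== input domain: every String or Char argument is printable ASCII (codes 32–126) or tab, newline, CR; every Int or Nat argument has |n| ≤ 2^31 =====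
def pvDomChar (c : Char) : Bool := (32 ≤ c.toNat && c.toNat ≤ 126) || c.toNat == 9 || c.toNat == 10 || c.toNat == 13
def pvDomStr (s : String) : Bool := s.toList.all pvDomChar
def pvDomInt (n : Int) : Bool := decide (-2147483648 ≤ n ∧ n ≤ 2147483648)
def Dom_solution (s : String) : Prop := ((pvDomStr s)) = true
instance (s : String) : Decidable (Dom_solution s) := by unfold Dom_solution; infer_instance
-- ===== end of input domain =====

-- B replaces A's char-by-char counter state machine by a staged prefix-count search:
-- each segment's length is found as the smallest even k with 2*s[:k].count(s[0]) == k,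
-- then the segment is cut off; same answers, different (alternative) algorithm.

-- ===== PORT A =====
-- for-loop of A: state (answer, x_count, other_count, x); x starts unassigned in
-- Python but is always set on the first character (0 == 0), so a dummy initial works.
def pvLoopA : List Char → Int → Nat → Nat → Char → Int
  | [], ans, _, _, _ => ans
  | c :: rest, ans, xc, oc, x =>
    let p := if xc == oc then (c, ans + 1) else (x, ans)
    let q := if c != p.1 then (xc, oc + 1) else (xc + 1, oc)
    pvLoopA rest p.2 q.1 q.2 p.1

def solution (s : String) : Int := pvLoopA s.toList 0 0 0 ' '

-- ===== PORT B =====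
-- the inner 'for j in range(2, len(s)+1, 2): if 2*s[:j].count(x)==j: k=j; break' of Source B,
-- ported as find? over the same range (first element satisfying the test, Python-exact;
-- s[:j].count(x) with x a single char is exact as List.count over the slice)
def pvFindB (l : List Char) (x : Char) : Option Int :=
  (PySem.List.pyRange 2 ((l.length : Int) + 1) 2).find?
    (fun k => 2 * (((PySem.List.slice l none (some k)).count x : Int)) == k)

-- membership bound used only for termination of the outer while loop
lemma pvFindB_ge (l : List Char) (x : Char) (k : Int) (h : pvFindB l x = some k) : 2 ≤ k := by
  have hm := List.mem_of_find?_eq_some h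
  exact ((PySem.List.mem_pyRange_iff_of_pos (by norm_num) k).mp hm).1

-- the outer 'while s:' loop of Source B: count the segment, cut it off
def pvOuterB : List Char → Int
  | [] => 0
  | c :: rest =>
    match h : pvFindB (c :: rest) c with
    | some k => 1 + pvOuterB ((c :: rest).drop k.toNat)
    | none => 1
termination_by l => l.length
decreasing_by
  have h2 := pvFindB_ge _ _ _ h
  have : 1 ≤ k.toNat := by omega
  simp only [List.length_drop, List.length_cons]
  omega

def solution_alt (s : String) : Int := pvOuterB s.toList

-- ===== PRECONDITION & SPEC =====
def Spec_solution (s : String) (out : Int) : Prop := out = solution_alt s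
instance (s : String) (out : Int) : Decidable (Spec_solution s out) := by unfold Spec_solution; infer_instance

-- ===== CLAIM (what is proved, stated in full; the proofs are below) =====
def Claim_equal_solution : Prop := ∀ (s : String), Dom_solution s → Spec_solution s (solution s)

-- ===== LEMMAS AND PROOFS =====

-- Proof-side intermediate: the segment decomposition as a char-by-char balance scan.
def pvSegConsume (x : Char) (bal : Int) : List Char → List Char
  | [] => []
  | c :: rest =>
    let bal' := if c == x then bal + 1 else bal - 1
    if bal' == 0 then rest else pvSegConsume x bal' rest

lemma pvSegConsume_length_le (x : Char) (bal : Int) (l : List Char) :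
    (pvSegConsume x bal l).length ≤ l.length := by
  induction l generalizing bal with
  | nil => simp [pvSegConsume]
  | cons c rest ih =>
    simp only [pvSegConsume]
    split <;> split
    · simp
    · exact Nat.le_succ_of_le (ih _)
    · simp
    · exact Nat.le_succ_of_le (ih _)

def pvOuter : List Char → Int
  | [] => 0
  | c :: rest => 1 + pvOuter (pvSegConsume c 0 (c :: rest))
termination_by l => l.length
decreasing_by
  simp only [pvSegConsume, beq_self_eq_true, if_true, List.length_cons]
  have h := pvSegConsume_length_le c (0 + 1) rest
  split <;> omega

-- A's counters are cumulative across segments; at a segment boundary they share a common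
-- value k, and inside a segment their difference equals the balance of pvSegConsume.
lemma pv_main (l : List Char) :
    (∀ (ans : Int) (k : Nat) (x : Char), pvLoopA l ans k k x = ans + pvOuter l) ∧
    (∀ (x : Char) (k xc oc : Nat) (ans : Int), xc ≠ oc →
       pvLoopA l ans (k + xc) (k + oc) x
         = ans + pvOuter (pvSegConsume x ((xc : Int) - (oc : Int)) l)) := by
  induction l with
  | nil => simp [pvLoopA, pvOuter, pvSegConsume]
  | cons c rest ih =>
    constructor
    · intro ans k x
      have h := ih.2 c k 1 0 (ans + 1) (by decide)
      simp only [pvLoopA, beq_self_eq_true, if_true, bne_self_eq_false, Bool.false_eq_true,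
        if_false, pvOuter, pvSegConsume] at h ⊢
      simp only [Nat.cast_one, Nat.cast_zero] at h
      norm_num at h ⊢
      rw [h]; ring
    · intro x k xc oc ans hne
      have hk : (k + xc == k + oc) = false := by
        simp only [beq_eq_false_iff_ne, ne_eq]; omega
      by_cases hc : c = x
      · by_cases hb : xc + 1 = oc
        · have h1 := ih.1 ans (k + oc) x
          simp only [pvLoopA, hk, Bool.false_eq_true, if_false, hc, bne_self_eq_false] at *
          simp only [pvSegConsume, beq_self_eq_true, if_true]
          have hbal : ((xc : Int) - oc + 1 == 0) = true := by
            simp only [beq_iff_eq]; omega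
          rw [hbal]
          simp only [if_true]
          have : k + xc + 1 = k + oc := by omega
          rw [this]
          exact h1
        · have h1 := ih.2 x k (xc + 1) oc ans hb
          simp only [pvLoopA, hk, Bool.false_eq_true, if_false, hc, bne_self_eq_false] at *
          simp only [pvSegConsume, beq_self_eq_true, if_true]
          have hbal : ((xc : Int) - oc + 1 == 0) = false := by
            simp only [beq_eq_false_iff_ne, ne_eq]; omega
          rw [hbal]
          simp only [Bool.false_eq_true, if_false]
          have : ((xc : Int) + 1 - oc) = ((xc : Int) - oc + 1) := by ring
          rw [← this]
          push_cast at h1 ⊢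
          exact h1
      · by_cases hb : xc = oc + 1
        · have h1 := ih.1 ans (k + xc) x
          have hcb : (c != x) = true := by simp [bne_iff_ne, hc]
          have hcb' : (c == x) = false := by simp [hc]
          simp only [pvLoopA, hk, Bool.false_eq_true, if_false, hcb, if_true] at *
          simp only [pvSegConsume, hcb', Bool.false_eq_true, if_false]
          have hbal : ((xc : Int) - oc - 1 == 0) = true := by
            simp only [beq_iff_eq]; omega
          rw [hbal]
          simp only [if_true]
          have : k + oc + 1 = k + xc := by omega
          rw [this]
          exact h1
        · have h1 := ih.2 x k xc (oc + 1) ans hb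
          have hcb : (c != x) = true := by simp [bne_iff_ne, hc]
          have hcb' : (c == x) = false := by simp [hc]
          simp only [pvLoopA, hk, Bool.false_eq_true, if_false, hcb, if_true] at *
          simp only [pvSegConsume, hcb', Bool.false_eq_true, if_false]
          have hbal : ((xc : Int) - oc - 1 == 0) = false := by
            simp only [beq_eq_false_iff_ne, ne_eq]; omega
          rw [hbal]
          simp only [Bool.false_eq_true, if_false]
          have : ((xc : Int) - (oc + 1)) = ((xc : Int) - oc - 1) := by ring
          rw [← this]
          push_cast at h1 ⊢
          exact h1

-- pyRange with step 2: the two induction forms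
lemma pvRange2_nil (a b : Int) (h : b ≤ a) : PySem.List.pyRange a b 2 = [] := by
  rw [PySem.List.pyRange_of_pos a b (by norm_num)]
  simp [not_lt.mpr h]

lemma pvRange2_cons (a b : Int) (h : a < b) :
    PySem.List.pyRange a b 2 = a :: PySem.List.pyRange (a + 2) b 2 := by
  rw [PySem.List.pyRange_of_pos a b (by norm_num),
      PySem.List.pyRange_of_pos (a + 2) b (by norm_num)]
  have hn : (if a < b then ((b - a + 2 - 1) / 2).toNat else 0)
      = (if a + 2 < b then ((b - (a + 2) + 2 - 1) / 2).toNat else 0) + 1 := by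
    by_cases h2 : a + 2 < b <;> simp [h, h2] <;> omega
  rw [hn, List.range_succ_eq_map]
  simp only [List.map_cons, List.map_map, Nat.cast_zero, mul_zero, add_zero]
  congr 1
  apply List.map_congr_left
  intro k _
  simp only [Function.comp, Nat.succ_eq_add_one]
  push_cast
  ring

-- the core bridge: at an even boundary m with balance 2*count(take m) - m, the balance
-- scan and the prefix-count search over the remaining even positions agree
lemma pvW (full : List Char) (x : Char) :
    ∀ (fuel m : Nat), full.length ≤ m + fuel → 2 ∣ m →
      pvSegConsume x (2 * ((full.take m).count x : Int) - m) (full.drop m)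
        = (match (PySem.List.pyRange ((m : Int) + 2) ((full.length : Int) + 1) 2).find?
              (fun k => 2 * (((PySem.List.slice full none (some k)).count x : Int)) == k) with
           | some k => full.drop k.toNat
           | none => []) := by
  intro fuel
  induction fuel with
  | zero =>
    intro m hle _
    have hdrop : full.drop m = [] := List.drop_eq_nil_of_le (by omega)
    have hrng : PySem.List.pyRange ((m : Int) + 2) ((full.length : Int) + 1) 2 = [] :=
      pvRange2_nil _ _ (by push_cast; omega)
    rw [hdrop, hrng]
    simp [pvSegConsume]
  | succ fuel ih =>
    intro m hle hdvd
    obtain ⟨t2, ht2⟩ := hdvd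
    by_cases hbig : m + 2 ≤ full.length
    · -- two more characters exist: step the scan by two and the range by one
      have hlt1 : m < full.length := by omega
      have hlt2 : m + 1 < full.length := by omega
      have hd1 : full.drop m = full[m] :: full.drop (m + 1) := List.drop_eq_getElem_cons hlt1
      have hd2 : full.drop (m + 1) = full[m + 1] :: full.drop (m + 2) :=
        List.drop_eq_getElem_cons hlt2
      have htk : full.take (m + 2) = full.take m ++ [full[m], full[m + 1]] := by
        rw [List.take_add, hd1, hd2]
        rfl
      have hto : ((m : Int) + 2).toNat = m + 2 := by omega
      have hsl : PySem.List.slice full none (some ((m : Int) + 2)) = full.take (m + 2) := by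
        rw [PySem.List.slice_to full (by omega), hto]
      have hrng : PySem.List.pyRange ((m : Int) + 2) ((full.length : Int) + 1) 2
          = ((m : Int) + 2) :: PySem.List.pyRange ((m : Int) + 2 + 2) ((full.length : Int) + 1) 2 :=
        pvRange2_cons _ _ (by push_cast; omega)
      -- the balance after the two characters
      set C0 : Int := ((full.take m).count x : Int) with hC0
      rw [hd1, hd2, hrng]
      have hIH := ih (m + 2) (by omega) ⟨t2 + 1, by omega⟩
      have hstep : ((m : Int) + 2 + 2) = (((m + 2 : Nat) : Int) + 2) := by push_cast; ring
      
      cases hcx : (full[m] == x) <;> cases hdx : (full[m + 1] == x) <;>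
        simp only [pvSegConsume, hcx, hdx, Bool.false_eq_true, if_false, if_true]
      · -- c ≠ x, d ≠ x : balance drops by two
        have hb2 : ((full.take (m + 2)).count x : Int) = ((full.take m).count x : Int) := by
          rw [htk, List.count_append]
          simp [List.count_cons, hcx, hdx]
        have h1 : ((2 * C0 - (m : Int) - 1) == 0) = false := by
          simp only [beq_eq_false_iff_ne, ne_eq]; omega
        rw [h1]
        simp only [Bool.false_eq_true, if_false]
        by_cases hz : (2 * ((full.take (m + 2)).count x : Int) = (m : Int) + 2)
        · rw [List.find?_cons_of_pos (by simp only [hsl, beq_iff_eq]; exact hz)]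
          have hz2 : ((2 * C0 - (m : Int) - 1 - 1) == 0) = true := by
            simp only [beq_iff_eq]; omega
          rw [hz2]
          simp [hto]
        · rw [List.find?_cons_of_neg (by simp only [hsl, beq_iff_eq]; exact hz)]
          have hz2 : ((2 * C0 - (m : Int) - 1 - 1) == 0) = false := by
            simp only [beq_eq_false_iff_ne, ne_eq]; omega
          rw [hz2]
          simp only [Bool.false_eq_true, if_false]
          have harith : (2 * C0 - (m : Int) - 1 - 1)
              = 2 * ((full.take (m + 2)).count x : Int) - ((m + 2 : Nat) : Int) := by
            rw [hb2, hC0]; push_cast; ring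
          rw [harith, hstep]
          exact hIH
      · -- c ≠ x, d = x : balance unchanged
        have hb2 : ((full.take (m + 2)).count x : Int) = ((full.take m).count x : Int) + 1 := by
          rw [htk, List.count_append]
          simp [List.count_cons, hcx, hdx]
        have h1 : ((2 * C0 - (m : Int) - 1) == 0) = false := by
          simp only [beq_eq_false_iff_ne, ne_eq]; omega
        rw [h1]
        simp only [Bool.false_eq_true, if_false]
        by_cases hz : (2 * ((full.take (m + 2)).count x : Int) = (m : Int) + 2)
        · rw [List.find?_cons_of_pos (by simp only [hsl, beq_iff_eq]; exact hz)]
          have hz2 : ((2 * C0 - (m : Int) - 1 + 1) == 0) = true := by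
            simp only [beq_iff_eq]; omega
          rw [hz2]
          simp [hto]
        · rw [List.find?_cons_of_neg (by simp only [hsl, beq_iff_eq]; exact hz)]
          have hz2 : ((2 * C0 - (m : Int) - 1 + 1) == 0) = false := by
            simp only [beq_eq_false_iff_ne, ne_eq]; omega
          rw [hz2]
          simp only [Bool.false_eq_true, if_false]
          have harith : (2 * C0 - (m : Int) - 1 + 1)
              = 2 * ((full.take (m + 2)).count x : Int) - ((m + 2 : Nat) : Int) := by
            rw [hb2, hC0]; push_cast; ring
          rw [harith, hstep]
          exact hIH
      · -- c = x, d ≠ x : balance unchanged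
        have hb2 : ((full.take (m + 2)).count x : Int) = ((full.take m).count x : Int) + 1 := by
          rw [htk, List.count_append]
          simp [List.count_cons, hcx, hdx]
        have h1 : ((2 * C0 - (m : Int) + 1) == 0) = false := by
          simp only [beq_eq_false_iff_ne, ne_eq]; omega
        rw [h1]
        simp only [Bool.false_eq_true, if_false]
        by_cases hz : (2 * ((full.take (m + 2)).count x : Int) = (m : Int) + 2)
        · rw [List.find?_cons_of_pos (by simp only [hsl, beq_iff_eq]; exact hz)]
          have hz2 : ((2 * C0 - (m : Int) + 1 - 1) == 0) = true := by
            simp only [beq_iff_eq]; omega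
          rw [hz2]
          simp [hto]
        · rw [List.find?_cons_of_neg (by simp only [hsl, beq_iff_eq]; exact hz)]
          have hz2 : ((2 * C0 - (m : Int) + 1 - 1) == 0) = false := by
            simp only [beq_eq_false_iff_ne, ne_eq]; omega
          rw [hz2]
          simp only [Bool.false_eq_true, if_false]
          have harith : (2 * C0 - (m : Int) + 1 - 1)
              = 2 * ((full.take (m + 2)).count x : Int) - ((m + 2 : Nat) : Int) := by
            rw [hb2, hC0]; push_cast; ring
          rw [harith, hstep]
          exact hIH
      · -- c = x, d = x : balance rises by two
        have hb2 : ((full.take (m + 2)).count x : Int) = ((full.take m).count x : Int) + 2 := by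
          rw [htk, List.count_append]
          simp [List.count_cons, hcx, hdx]
        have h1 : ((2 * C0 - (m : Int) + 1) == 0) = false := by
          simp only [beq_eq_false_iff_ne, ne_eq]; omega
        rw [h1]
        simp only [Bool.false_eq_true, if_false]
        by_cases hz : (2 * ((full.take (m + 2)).count x : Int) = (m : Int) + 2)
        · rw [List.find?_cons_of_pos (by simp only [hsl, beq_iff_eq]; exact hz)]
          have hz2 : ((2 * C0 - (m : Int) + 1 + 1) == 0) = true := by
            simp only [beq_iff_eq]; omega
          rw [hz2]
          simp [hto]
        · rw [List.find?_cons_of_neg (by simp only [hsl, beq_iff_eq]; exact hz)]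
          have hz2 : ((2 * C0 - (m : Int) + 1 + 1) == 0) = false := by
            simp only [beq_eq_false_iff_ne, ne_eq]; omega
          rw [hz2]
          simp only [Bool.false_eq_true, if_false]
          have harith : (2 * C0 - (m : Int) + 1 + 1)
              = 2 * ((full.take (m + 2)).count x : Int) - ((m + 2 : Nat) : Int) := by
            rw [hb2, hC0]; push_cast; ring
          rw [harith, hstep]
          exact hIH
    · -- at most one character left: the range is empty and the scan runs out
      have hrng : PySem.List.pyRange ((m : Int) + 2) ((full.length : Int) + 1) 2 = [] :=
        pvRange2_nil _ _ (by push_cast; omega)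
      rw [hrng]
      by_cases hlast : m < full.length
      · have hd1 : full.drop m = full[m] :: full.drop (m + 1) := List.drop_eq_getElem_cons hlast
        have hd2 : full.drop (m + 1) = [] := List.drop_eq_nil_of_le (by omega)
        rw [hd1, hd2]
        simp only [pvSegConsume, List.find?_nil]
        cases hcx : (full[m] == x) <;> simp only [Bool.false_eq_true, if_false, if_true]
        · have h1 : ((2 * ((full.take m).count x : Int) - (m : Int) - 1) == 0) = false := by
            simp only [beq_eq_false_iff_ne, ne_eq]; omega
          rw [h1]
          simp [pvSegConsume]
        · have h1 : ((2 * ((full.take m).count x : Int) - (m : Int) + 1) == 0) = false := by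
            simp only [beq_eq_false_iff_ne, ne_eq]; omega
          rw [h1]
          simp [pvSegConsume]
      · have hdrop : full.drop m = [] := List.drop_eq_nil_of_le (by omega)
        rw [hdrop]
        simp [pvSegConsume]

lemma pvBO (l : List Char) : pvOuterB l = pvOuter l := by
  generalize hn : l.length = n
  induction n using Nat.strong_induction_on generalizing l with
  | _ n ihn =>
    cases l with
    | nil => simp [pvOuterB, pvOuter]
    | cons c rest =>
      have hseg := pvW (c :: rest) c (c :: rest).length 0 (by omega) ⟨0, rfl⟩
      simp only [List.take_zero, List.count_nil, Nat.cast_zero, mul_zero, sub_zero, zero_add,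
        List.drop_zero] at hseg
      rw [pvOuter, pvOuterB]
      cases hf : pvFindB (c :: rest) c with
      | none =>
        dsimp only
        rw [pvFindB] at hf
        rw [hf] at hseg
        rw [hseg]
        simp [pvOuter]
      | some k =>
        dsimp only
        have h2 : 2 ≤ k := pvFindB_ge _ _ _ hf
        rw [pvFindB] at hf
        rw [hf] at hseg
        rw [hseg]
        have hlen : ((c :: rest).drop k.toNat).length < n := by
          simp only [List.length_drop, List.length_cons] at *
          omega
        rw [ihn _ hlen _ rfl]

-- ===== VERDICT (by name: the statement is the Claim_ definition above) =====
theorem solution_spec : Claim_equal_solution := by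
  intro s _
  unfold Spec_solution solution solution_alt
  rw [pvBO]
  have h := (pv_main s.toList).1 0 0 ' '
  simpa using h
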